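-- pv_equiv track=rewrite | github.com/Kembrik/Python-scripts | PoE_Sell.py | sorting_items
-- ===== SOURCE A (Python) =====
-- def sorting_items(arrItems):  # сортировка предметов
--     tmpSet = 1
--     arrQuality = []
--     while tmpSet:
--         tmpSet = grouping_items(len(arrItems), tmpSet, arrItems)
--         if tmpSet:
--             arrQuality.append(creat_set(arrItems, tmpSet))
--             arrItems = updating_set_Quality(arrItems, tmpSet)
--
--     return arrQuality
--
-- def creat_set(arrItems, tmpSet):  # создание сета суммы предметов
--     setItem = [x[1:] for n, x in enumerate(arrItems) if tmpSet[n]]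
--     return setItem
--
-- def grouping_items(n, tmpSet, arrItems, prefix=[]):  # генерирование вариантов
--     if n == 0:
--         if calculation(prefix, arrItems):
--             tmpSet = prefix[:]
--             return tmpSet
--     else:
--         tmpSet = grouping_items(n - 1, tmpSet, arrItems, prefix + [0])
--         if tmpSet:
--             return tmpSet
--         tmpSet = grouping_items(n - 1, tmpSet, arrItems, prefix + [1])
--         if tmpSet:
--             return tmpSet
--     return []
--
-- def calculation(prefix, arrItems):  # подсчет суммы
--     # mass = 0
--     sumQuality = 40
--     for i in range(len(prefix)):
--         if prefix[i] == 1: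
--             sumQuality -= arrItems[i][0]
--     if not sumQuality:
--         return 1
--     return 0
--
-- def updating_set_Quality(arrItems, tmpSet):  # обновление списка предметов
--     arrItems = [x for n, x in enumerate(arrItems) if not tmpSet[n]]
--     return arrItems
-- ===== SOURCE B (Python) =====
-- def sorting_items(arrItems):  # suffix reachable-sum sets + greedy lex reconstruction (prefer 0)
--     result = []
--     while True:
--         n = len(arrItems)
--         # reach[i] = set of sums obtainable by selecting a subset of items i..n-1
--         reach = [set() for _ in range(n + 1)]
--         reach[n] = {0}
--         for i in range(n - 1, -1, -1):
--             reach[i] = reach[i + 1] | {arrItems[i][0] + s for s in reach[i + 1]}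
--         if 40 not in reach[0]:
--             return result
--         bits = []
--         t = 40
--         for x, r in zip(arrItems, reach[1:]):
--             if t in r:
--                 bits.append(0)
--             else:
--                 bits.append(1)
--                 t -= x[0]
--         result.append([x[1:] for x, b in zip(arrItems, bits) if b])
--         arrItems = [x for x, b in zip(arrItems, bits) if not b]
-- ===== Notes on version B (the rewrite author's own statement) =====
-- stated objective: faster
-- what changed: Replaced the exhaustive lexicographic DFS over all 2^n 0/1 prefixes (restarted for every extracted set) by suffix reachable-sum sets computed once per round plus a greedy front-to-back reconstruction that prefers bit 0 whenever the remaining target stays reachable, which yields the same lexicographically smallest selection vector.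
import Mathlib
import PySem

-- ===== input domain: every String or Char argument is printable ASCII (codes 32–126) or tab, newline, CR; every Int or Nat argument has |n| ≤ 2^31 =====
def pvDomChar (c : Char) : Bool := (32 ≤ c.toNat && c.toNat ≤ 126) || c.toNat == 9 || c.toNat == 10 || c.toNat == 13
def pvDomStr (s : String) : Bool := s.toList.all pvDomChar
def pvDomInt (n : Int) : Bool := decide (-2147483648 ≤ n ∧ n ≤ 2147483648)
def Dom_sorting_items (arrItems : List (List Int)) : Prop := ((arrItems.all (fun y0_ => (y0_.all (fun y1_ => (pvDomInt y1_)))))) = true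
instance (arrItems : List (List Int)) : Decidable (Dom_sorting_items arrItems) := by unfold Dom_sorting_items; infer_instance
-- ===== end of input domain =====

-- B replaces A's exhaustive lexicographic 0/1-pfx DFS (2^n prefixes per extracted set) by
-- suffix reachable-sum sets plus a greedy front-to-back reconstruction preferring bit 0;
-- objective: faster. Return-value equivalence only; neither program mutates its argument.

-- ===== PORT A =====
-- calculation: the running 'sumQuality' fold (arrItems[i][0] is read only where pfx[i]==1;
-- the '.getD'/'.headD 0' defaults stand for Python's IndexError and are unreached under Pre_).
def pvSumA (pfx : List Int) (arrItems : List (List Int)) : Int :=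
  (List.range pfx.length).foldl
    (fun s i => if pfx.getD i 0 = 1 then s - (arrItems.getD i []).headD 0 else s) 40

-- Python's 'return 1 / return 0' consumed by 'if calculation(...)' ports as Bool
def pvCalcA (pfx : List Int) (arrItems : List (List Int)) : Bool :=
  pvSumA pfx arrItems == 0

-- grouping_items: DFS over prefixes, 0 branch first (tmpSet parameter is dead in Python; dropped)
def pvGroupA (arrItems : List (List Int)) : Nat → List Int → List Int
  | 0, pfx => if pvCalcA pfx arrItems then pfx else []
  | n + 1, pfx =>
    let t := pvGroupA arrItems n (pfx ++ [0])
    if t ≠ [] then t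
    else
      let t2 := pvGroupA arrItems n (pfx ++ [1])
      if t2 ≠ [] then t2 else []

-- creat_set: [x[1:] for n, x in enumerate(arrItems) if tmpSet[n]]  (x[1:] = drop 1)
def pvCreatSetA (arrItems : List (List Int)) (tmpSet : List Int) : List (List Int) :=
  (PySem.List.enumerate arrItems 0).filterMap
    (fun p => if PySem.List.pyGetD tmpSet p.1 0 ≠ 0 then some (p.2.drop 1) else none)

-- updating_set_Quality: [x for n, x in enumerate(arrItems) if not tmpSet[n]]
def pvUpdatingA (arrItems : List (List Int)) (tmpSet : List Int) : List (List Int) :=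
  (PySem.List.enumerate arrItems 0).filterMap
    (fun p => if PySem.List.pyGetD tmpSet p.1 0 = 0 then some p.2 else none)

-- the while-loop; each successful round removes at least one item, so fuel length+1 is never exhausted
def pvLoopA : Nat → List (List Int) → List (List (List Int)) → List (List (List Int))
  | 0, _, acc => acc
  | f + 1, arrItems, acc =>
    let t := pvGroupA arrItems arrItems.length []
    if t ≠ [] then
      pvLoopA f (pvUpdatingA arrItems t) (acc ++ [pvCreatSetA arrItems t])
    else acc

def sorting_items (arrItems : List (List Int)) : List (List (List Int)) :=
  pvLoopA (arrItems.length + 1) arrItems []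

-- ===== PORT B =====
-- x[0] (IndexError on an empty row in Python, unreached under Pre_)
def pvQual (x : List Int) : Int := x.headD 0

-- reach[i] = set of sums obtainable from items i..n-1, built back to front
def pvReachB : List (List Int) → List (PySem.Set Int)
  | [] => [PySem.Set.ofList [0]]
  | x :: rest =>
    let rs := pvReachB rest
    let r0 := rs.headD []
    (PySem.Set.union r0 (r0.map (fun s => pvQual x + s))) :: rs

-- greedy bits: for x, r in zip(arrItems, reach[1:])
def pvBitsB : List (List Int) → List (PySem.Set Int) → Int → List Int
  | x :: xs, r :: rs, t =>
    if PySem.Set.contains r t then 0 :: pvBitsB xs rs t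
    else 1 :: pvBitsB xs rs (t - pvQual x)
  | _, _, _ => []

-- the while True loop of Source B, with the same fuel bound (never exhausted: a round removes ≥ 1 item)
def pvLoopB : Nat → List (List Int) → List (List (List Int)) → List (List (List Int))
  | 0, _, acc => acc
  | f + 1, arrItems, acc =>
    let reach := pvReachB arrItems
    if PySem.Set.contains (reach.headD []) 40 then
      let bits := pvBitsB arrItems reach.tail 40
      pvLoopB f ((arrItems.zip bits).filterMap (fun p => if p.2 = 0 then some p.1 else none))
        (acc ++ [(arrItems.zip bits).filterMap (fun p => if p.2 ≠ 0 then some (p.1.drop 1) else none)])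
    else acc

def sorting_items_alt (arrItems : List (List Int)) : List (List (List Int)) :=
  pvLoopB (arrItems.length + 1) arrItems []

-- ===== PRECONDITION & SPEC =====
-- Pre_ excludes inputs containing an empty item row: on those Python A (and B) always ends up
-- evaluating row[0] and raises IndexError, returning nothing.
def Pre_sorting_items (arrItems : List (List Int)) : Prop := ∀ x ∈ arrItems, x ≠ []
instance (arrItems : List (List Int)) : Decidable (Pre_sorting_items arrItems) := by
  unfold Pre_sorting_items; infer_instance

def pvWitness_sorting_items : List (List Int) := [[40], [1, 2], [39, 5]]

def Spec_sorting_items (arrItems : List (List Int)) (out : List (List (List Int))) : Prop :=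
  out = sorting_items_alt arrItems
instance (arrItems : List (List Int)) (out : List (List (List Int))) : Decidable (Spec_sorting_items arrItems out) := by
  unfold Spec_sorting_items; infer_instance

-- ===== CLAIM (what is proved, stated in full; the proofs are below) =====
def Claim_equal_sorting_items : Prop := ∀ (arrItems : List (List Int)), Dom_sorting_items arrItems → Pre_sorting_items arrItems → Spec_sorting_items arrItems (sorting_items arrItems)

-- ===== LEMMAS AND PROOFS =====

-- pvReachB is never empty
theorem pvReachB_ne_nil (xs : List (List Int)) : pvReachB xs ≠ [] := by
  cases xs <;> simp [pvReachB]

theorem pvReachB_length (xs : List (List Int)) : (pvReachB xs).length = xs.length + 1 := by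
  induction xs with
  | nil => simp [pvReachB]
  | cons x xs ih => simp [pvReachB, ih]

-- membership in the head reach set of q :: qs
theorem reach_head_cons (x : List Int) (rest : List (List Int)) (t : Int) :
    PySem.Set.contains ((pvReachB (x :: rest)).headD []) t =
      (PySem.Set.contains ((pvReachB rest).headD []) t
        || PySem.Set.contains ((pvReachB rest).headD []) (t - pvQual x)) := by
  rw [Bool.eq_iff_iff, Bool.or_eq_true]
  simp only [pvReachB, List.headD_cons, PySem.Set.contains_iff, PySem.Set.mem_union,
    List.mem_map]
  constructor
  · rintro (h | ⟨s, hs, rfl⟩)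
    · exact Or.inl h
    · exact Or.inr (by simpa using hs)
  · rintro (h | h)
    · exact Or.inl h
    · exact Or.inr ⟨t - pvQual x, h, by ring⟩

theorem pvBitsB_length (xs : List (List Int)) (rs : List (PySem.Set Int)) (t : Int)
    (h : rs.length = xs.length) : (pvBitsB xs rs t).length = xs.length := by
  induction xs generalizing rs t with
  | nil => simp [pvBitsB]
  | cons x xs ih =>
    cases rs with
    | nil => simp at h
    | cons r rs =>
      simp only [List.length_cons, Nat.add_right_cancel_iff] at h
      by_cases hc : t ∈ r
      · simp [pvBitsB, hc, ih rs t h]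
      · simp [pvBitsB, hc, ih rs (t - pvQual x) h]

-- sum over pfx ++ [0] / [1]
theorem pvSumA_append0 (pfx : List Int) (arrItems : List (List Int)) :
    pvSumA (pfx ++ [0]) arrItems = pvSumA pfx arrItems := by
  unfold pvSumA
  rw [List.length_append, List.length_cons, List.length_nil, List.range_succ,
    List.foldl_append]
  simp only [List.foldl_cons, List.foldl_nil]
  rw [List.getD_append_right _ _ _ _ (Nat.le_refl _), Nat.sub_self]
  norm_num
  apply PySem.List.foldl_congr_mem
  intro s i hi
  rw [List.getElem?_append_left (List.mem_range.mp hi)]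

theorem pvSumA_append1 (pfx : List Int) (arrItems : List (List Int)) :
    pvSumA (pfx ++ [1]) arrItems
      = pvSumA pfx arrItems - (arrItems.getD pfx.length []).headD 0 := by
  unfold pvSumA
  rw [List.length_append, List.length_cons, List.length_nil, List.range_succ,
    List.foldl_append]
  simp only [List.foldl_cons, List.foldl_nil]
  rw [List.getD_append_right _ _ _ _ (Nat.le_refl _), Nat.sub_self]
  norm_num
  apply PySem.List.foldl_congr_mem
  intro s i hi
  rw [List.getElem?_append_left (List.mem_range.mp hi)]

-- the tail of the reach list of x :: rest is the reach list of rest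
theorem reach_tail_cons (x : List Int) (rest : List (List Int)) :
    (pvReachB (x :: rest)).tail = pvReachB rest := by
  simp [pvReachB]

-- the DFS finds exactly the greedy reconstruction whenever the target is reachable
theorem groupA_eq_greedy (arrItems : List (List Int)) :
    ∀ (n : Nat) (pfx : List Int), pfx.length + n = arrItems.length →
      pvGroupA arrItems n pfx =
        (if PySem.Set.contains ((pvReachB (arrItems.drop pfx.length)).headD []) (pvSumA pfx arrItems) then
          pfx ++ pvBitsB (arrItems.drop pfx.length) (pvReachB (arrItems.drop pfx.length)).tail (pvSumA pfx arrItems)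
        else []) := by
  intro n
  induction n with
  | zero =>
    intro pfx h
    rw [Nat.add_zero] at h
    rw [h, List.drop_length]
    simp only [pvGroupA, pvReachB, pvBitsB, List.headD_cons, List.append_nil]
    have hc : PySem.Set.contains (PySem.Set.ofList [(0 : Int)]) (pvSumA pfx arrItems)
        = pvCalcA pfx arrItems := by
      rw [Bool.eq_iff_iff, PySem.Set.contains_iff, PySem.Set.mem_ofList, pvCalcA,
        beq_iff_eq]
      simp
    rw [hc]
  | succ n ih =>
    intro pfx h
    have hlt : pfx.length < arrItems.length := by omega
    have hdrop : arrItems.drop pfx.length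
        = arrItems[pfx.length] :: arrItems.drop (pfx.length + 1) :=
      List.drop_eq_getElem_cons hlt
    have hq : (arrItems.getD pfx.length []).headD 0 = pvQual arrItems[pfx.length] := by
      rw [List.getD_eq_getElem?_getD, List.getElem?_eq_getElem hlt]; rfl
    have ih0 := ih (pfx ++ [(0 : Int)]) (by simp; omega)
    have ih1 := ih (pfx ++ [(1 : Int)]) (by simp; omega)
    simp only [List.length_append, List.length_cons, List.length_nil, Nat.zero_add,
      pvSumA_append0, pvSumA_append1, hq] at ih0 ih1
    obtain ⟨r, rs, hrs⟩ : ∃ r rs, pvReachB (arrItems.drop (pfx.length + 1)) = r :: rs := by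
      cases e : pvReachB (arrItems.drop (pfx.length + 1)) with
      | nil => exact absurd e (pvReachB_ne_nil _)
      | cons a b => exact ⟨a, b, rfl⟩
    rw [hdrop, reach_head_cons, reach_tail_cons, hrs] at ⊢
    rw [hrs] at ih0 ih1
    simp only [List.headD_cons, List.tail_cons] at ih0 ih1 ⊢
    by_cases c0 : pvSumA pfx arrItems ∈ r
    · simp [pvGroupA, ih0, pvBitsB, c0]
    · by_cases c1 : pvSumA pfx arrItems - pvQual arrItems[pfx.length] ∈ r
      · simp [pvGroupA, ih0, ih1, pvBitsB, c0, c1]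
      · simp [pvGroupA, ih0, ih1, c0, c1]


-- enumerate/indexing comprehension = zip comprehension (when the bit list has the items' length)
theorem enum_filterMap_eq_zip (items : List (List Int)) (bits : List Int)
    (keep : Int → Prop) [DecidablePred keep] (g : List Int → List Int) :
    ∀ (s : Nat), bits.length = s + items.length →
      (PySem.List.enumerate items (s : Int)).filterMap
          (fun p => if keep (PySem.List.pyGetD bits p.1 0) then some (g p.2) else none)
        = (items.zip (bits.drop s)).filterMap (fun p => if keep p.2 then some (g p.1) else none) := by
  induction items with
  | nil => intro s h; simp [PySem.List.enumerate]
  | cons x items ih =>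
    intro s h
    have hs : s < bits.length := by simp at h; omega
    have hd : bits.drop s = bits[s] :: bits.drop (s + 1) := List.drop_eq_getElem_cons hs
    rw [PySem.List.enumerate_cons, hd]
    simp only [List.zip_cons_cons, List.filterMap_cons]
    have hget : PySem.List.pyGetD bits (s : Int) 0 = bits[s] := by
      rw [PySem.List.pyGetD_natCast, List.getD_eq_getElem?_getD, List.getElem?_eq_getElem hs,
        Option.getD_some]
    have hcast : ((s : Int) + 1) = ((s + 1 : Nat) : Int) := by push_cast; ring
    rw [hget, hcast, ih (s + 1) (by simp at h ⊢; omega)]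

theorem loopA_eq_loopB (f : Nat) :
    ∀ (arrItems : List (List Int)) (acc : List (List (List Int))),
      pvLoopA f arrItems acc = pvLoopB f arrItems acc := by
  induction f with
  | zero => intro arrItems acc; rfl
  | succ f ih =>
    intro arrItems acc
    have hg := groupA_eq_greedy arrItems arrItems.length [] (by simp)
    rw [show pvSumA [] arrItems = 40 from rfl] at hg
    simp only [List.length_nil, List.drop_zero] at hg
    by_cases c : PySem.Set.contains ((pvReachB arrItems).headD []) (40 : Int) = true
    · cases arrItems with
      | nil =>
        exfalso
        rw [PySem.Set.contains_iff] at c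
        simp [pvReachB] at c
      | cons x xs =>
        obtain ⟨r, rs, hrs⟩ : ∃ r rs, pvReachB xs = r :: rs := by
          cases e : pvReachB xs with
          | nil => exact absurd e (pvReachB_ne_nil _)
          | cons a b => exact ⟨a, b, rfl⟩
        have htail : (pvReachB (x :: xs)).tail = pvReachB xs := reach_tail_cons x xs
        have hbits_ne : pvBitsB (x :: xs) (pvReachB xs) 40 ≠ [] := by
          rw [hrs]; unfold pvBitsB; split <;> simp
        have hlenb : (pvBitsB (x :: xs) (pvReachB xs) 40).length = (x :: xs).length := by
          apply pvBitsB_length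
          simp [pvReachB_length]
        have hzip1 := enum_filterMap_eq_zip (x :: xs) (pvBitsB (x :: xs) (pvReachB xs) 40)
          (fun v => v ≠ 0) (fun l => l.drop 1) 0 (by simp [hlenb])
        have hzip2 := enum_filterMap_eq_zip (x :: xs) (pvBitsB (x :: xs) (pvReachB xs) 40)
          (fun v => v = 0) (fun l => l) 0 (by simp [hlenb])
        simp only [Nat.cast_zero, List.drop_zero] at hzip1 hzip2
        simp only [pvLoopA, pvLoopB, htail]
        rw [hg]
        simp only [c, if_true, List.nil_append, htail]
        rw [if_pos hbits_ne, ih]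
        have h1 : pvCreatSetA (x :: xs) (pvBitsB (x :: xs) (pvReachB xs) 40)
            = List.filterMap (fun p => if p.2 ≠ 0 then some (List.drop 1 p.1) else none)
                ((x :: xs).zip (pvBitsB (x :: xs) (pvReachB xs) 40)) := by
          unfold pvCreatSetA; simpa using hzip1
        have h2 : pvUpdatingA (x :: xs) (pvBitsB (x :: xs) (pvReachB xs) 40)
            = List.filterMap (fun p => if p.2 = 0 then some p.1 else none)
                ((x :: xs).zip (pvBitsB (x :: xs) (pvReachB xs) 40)) := by
          unfold pvUpdatingA; simpa using hzip2
        rw [h1, h2]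
    · have hmem : (40 : Int) ∉ ((pvReachB arrItems).headD []) := by
        intro hm
        exact c (by rw [PySem.Set.contains_iff]; exact hm)
      simp only [List.headD_eq_head?_getD] at hmem
      simp only [pvLoopA, pvLoopB]
      rw [hg]
      simp [hmem]

-- ===== VERDICT (by name: the statement is the Claim_ definition above) =====
theorem sorting_items_spec : Claim_equal_sorting_items := by
  intro arrItems _ _
  unfold Spec_sorting_items sorting_items sorting_items_alt
  exact loopA_eq_loopB _ _ _
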